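-- pv_equiv track=rewrite | github.com/AHADKHATTAK1/new-fitness-app | import_validator.py | get_import_summary
-- ===== SOURCE A (Python) =====
-- from typing import Dict, List, Any
--
-- def get_import_summary(validated_rows: List[Dict]) -> Dict[str, int]:
--     """Get summary counts for import"""
--     summary = {
--         'total': len(validated_rows),
--         'will_import': 0,
--         'will_skip': 0,
--         'new_members': 0,
--         'updates': 0,
--         'merges': 0,
--         'errors': 0
--     }
--
--     for row in validated_rows:
--         if row['status'] == 'error':
--             summary['errors'] += 1
--         elif row.get('will_import'):
--             summary['will_import'] += 1
--             if row.get('existing_member'):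
--                 if row.get('duplicate_action') == 'update':
--                     summary['updates'] += 1
--                 elif row.get('duplicate_action') == 'merge':
--                     summary['merges'] += 1
--             else:
--                 summary['new_members'] += 1
--         else:
--             summary['will_skip'] += 1
--
--     return summary
-- ===== SOURCE B (Python) =====
-- from typing import Dict, List, Any
--
-- def get_import_summary(validated_rows: List[Dict]) -> Dict[str, int]:
--     """Get summary counts for import (multi-pass: one filtered count per key)"""
--     errors = sum(1 for row in validated_rows if row['status'] == 'error')
--     importing = [row for row in validated_rows
--                  if row['status'] != 'error' and row.get('will_import')]
--     will_skip = sum(1 for row in validated_rows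
--                     if row['status'] != 'error' and not row.get('will_import'))
--     new_members = sum(1 for row in importing if not row.get('existing_member'))
--     updates = sum(1 for row in importing
--                   if row.get('existing_member') and row.get('duplicate_action') == 'update')
--     merges = sum(1 for row in importing
--                  if row.get('existing_member') and row.get('duplicate_action') == 'merge')
--     return {
--         'total': len(validated_rows),
--         'will_import': len(importing),
--         'will_skip': will_skip,
--         'new_members': new_members,
--         'updates': updates,
--         'merges': merges,
--         'errors': errors,
--     }
-- ===== Notes on version B (the rewrite author's own statement) =====
-- stated objective: alternative
-- what changed: Replaces A's single branching loop mutating a counter dict with independent filtered counting passes, one per summary key, assembling the result dict once at the end.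
import Mathlib
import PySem

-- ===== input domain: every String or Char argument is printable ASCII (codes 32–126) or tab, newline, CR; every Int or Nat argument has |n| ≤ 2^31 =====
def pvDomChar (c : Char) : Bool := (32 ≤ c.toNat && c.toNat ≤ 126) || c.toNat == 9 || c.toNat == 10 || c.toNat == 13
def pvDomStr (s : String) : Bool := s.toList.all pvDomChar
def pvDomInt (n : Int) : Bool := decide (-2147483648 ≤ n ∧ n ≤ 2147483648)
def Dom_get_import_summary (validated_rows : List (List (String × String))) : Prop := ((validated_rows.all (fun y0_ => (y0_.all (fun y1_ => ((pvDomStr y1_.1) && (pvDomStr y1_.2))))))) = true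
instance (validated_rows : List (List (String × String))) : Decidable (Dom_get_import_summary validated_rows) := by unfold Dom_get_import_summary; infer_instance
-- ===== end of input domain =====

-- B replaces A's single branching loop over a mutated counter dict by independent
-- filtered counting passes, one per summary key (objective: alternative, same cost).

-- ===== PORT A =====
-- row[k] / row.get(k): first-match lookup in the row's association list
def aGet (row : List (String × String)) (k : String) : Option String :=
  (PySem.Dict.mk row).get? k

-- the body of A's for-loop, mutating the summary dict (row['status'] is read with
-- default "" — inputs where the key is missing raise in Python and are outside Pre_)
def aStep (d : PySem.Dict String Int) (row : List (String × String)) : PySem.Dict String Int :=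
  if (aGet row "status").getD "" == "error" then
    d.modify "errors" 0 (· + 1)
  else if (aGet row "will_import").getD "" != "" then
    let d := d.modify "will_import" 0 (· + 1)
    if (aGet row "existing_member").getD "" != "" then
      if aGet row "duplicate_action" == some "update" then d.modify "updates" 0 (· + 1)
      else if aGet row "duplicate_action" == some "merge" then d.modify "merges" 0 (· + 1)
      else d
    else d.modify "new_members" 0 (· + 1)
  else
    d.modify "will_skip" 0 (· + 1)

def get_import_summary (validated_rows : List (List (String × String))) : List (String × Int) :=
  (validated_rows.foldl aStep
    (PySem.Dict.ofList
      [("total", (validated_rows.length : Int)), ("will_import", 0), ("will_skip", 0),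
       ("new_members", 0), ("updates", 0), ("merges", 0), ("errors", 0)])).items

-- ===== PORT B =====
def bGet (row : List (String × String)) (k : String) : Option String :=
  (PySem.Dict.mk row).get? k

-- truthiness of row.get(k) for string values: present and nonempty
def bTruthy (row : List (String × String)) (k : String) : Bool :=
  (bGet row k).getD "" != ""

def get_import_summary_alt (validated_rows : List (List (String × String))) : List (String × Int) :=
  let errors : Int := validated_rows.countP (fun r => (bGet r "status").getD "" == "error")
  let importing := validated_rows.filter
    (fun r => (bGet r "status").getD "" != "error" && bTruthy r "will_import")
  let will_skip : Int := validated_rows.countP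
    (fun r => (bGet r "status").getD "" != "error" && !bTruthy r "will_import")
  let new_members : Int := importing.countP (fun r => !bTruthy r "existing_member")
  let updates : Int := importing.countP
    (fun r => bTruthy r "existing_member" && (bGet r "duplicate_action" == some "update"))
  let merges : Int := importing.countP
    (fun r => bTruthy r "existing_member" && (bGet r "duplicate_action" == some "merge"))
  [("total", (validated_rows.length : Int)), ("will_import", (importing.length : Int)),
   ("will_skip", will_skip), ("new_members", new_members), ("updates", updates),
   ("merges", merges), ("errors", errors)]

-- ===== PRECONDITION & SPEC =====
-- Pre_ excludes rows without a 'status' key: there Python A raises KeyError (row['status']).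
def Pre_get_import_summary (validated_rows : List (List (String × String))) : Prop :=
  ∀ r ∈ validated_rows, (r.any (fun p => p.1 == "status")) = true

instance (validated_rows : List (List (String × String))) : Decidable (Pre_get_import_summary validated_rows) := by
  unfold Pre_get_import_summary; infer_instance

def pvWitness_get_import_summary : (List (List (String × String))) :=
  [[("status", "ok"), ("will_import", "yes")], [("status", "error")]]

def Spec_get_import_summary (validated_rows : List (List (String × String))) (out : List (String × Int)) : Prop := out = get_import_summary_alt validated_rows
instance (validated_rows : List (List (String × String))) (out : List (String × Int)) : Decidable (Spec_get_import_summary validated_rows out) := by unfold Spec_get_import_summary; infer_instance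

-- ===== CLAIM (what is proved, stated in full; the proofs are below) =====
def Claim_equal_get_import_summary : Prop := ∀ (validated_rows : List (List (String × String))), Dom_get_import_summary validated_rows → Pre_get_import_summary validated_rows → Spec_get_import_summary validated_rows (get_import_summary validated_rows)

-- ===== LEMMAS AND PROOFS =====

-- loop invariant: running A's loop from a summary dict with the seven literal keys adds
-- B's filtered counts to the corresponding entries
theorem foldl_aStep_items (rows : List (List (String × String)))
    (n wi ws nm u m e : Int) :
    (rows.foldl aStep
      (PySem.Dict.mk
        [("total", n), ("will_import", wi), ("will_skip", ws),
         ("new_members", nm), ("updates", u), ("merges", m), ("errors", e)])).items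
    = [("total", n),
       ("will_import", wi + rows.countP (fun r => (bGet r "status").getD "" != "error" && bTruthy r "will_import")),
       ("will_skip", ws + rows.countP (fun r => (bGet r "status").getD "" != "error" && !bTruthy r "will_import")),
       ("new_members", nm + rows.countP (fun r => ((bGet r "status").getD "" != "error" && bTruthy r "will_import") && !bTruthy r "existing_member")),
       ("updates", u + rows.countP (fun r => ((bGet r "status").getD "" != "error" && bTruthy r "will_import") && (bTruthy r "existing_member" && (bGet r "duplicate_action" == some "update")))),
       ("merges", m + rows.countP (fun r => ((bGet r "status").getD "" != "error" && bTruthy r "will_import") && (bTruthy r "existing_member" && (bGet r "duplicate_action" == some "merge")))),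
       ("errors", e + rows.countP (fun r => (bGet r "status").getD "" == "error"))] := by
  induction rows generalizing wi ws nm u m e with
  | nil => simp
  | cons r rs ih =>
    rw [List.foldl_cons]
    by_cases h1 : ((aGet r "status").getD "" == "error") = true
    · have heq : ((PySem.Dict.mk r).get? "status").getD "" = "error" := by
        simpa [aGet] using h1
      have h1' : ((bGet r "status").getD "" != "error") = false := by simp [bGet, heq]
      have he : ((bGet r "status").getD "" == "error") = true := by simp [bGet, heq]
      simp [aStep, h1, PySem.Dict.modify, PySem.Dict.insert, PySem.Dict.getD, PySem.Dict.get?, PySem.Dict.contains, ih, List.countP_cons, h1', he]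
      ring_nf <;> simp
    · have hne : ¬ ((PySem.Dict.mk r).get? "status").getD "" = "error" := by
        simpa [aGet] using h1
      have h1' : ((bGet r "status").getD "" != "error") = true := by simp [bGet, hne]
      have he : ((bGet r "status").getD "" == "error") = false := by simp [bGet, hne]
      by_cases h2 : ((aGet r "will_import").getD "" != "") = true
      · have h2' : bTruthy r "will_import" = true := by simpa [bTruthy, bGet, aGet] using h2
        by_cases h3 : ((aGet r "existing_member").getD "" != "") = true
        · have h3' : bTruthy r "existing_member" = true := by
            simpa [bTruthy, bGet, aGet] using h3
          by_cases h4 : (aGet r "duplicate_action" == some "update") = true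
          · have h4' : (bGet r "duplicate_action" == some "update") = true := by
              simpa [bGet, aGet] using h4
            have h4m : (bGet r "duplicate_action" == some "merge") = false := by
              simp only [bGet, aGet] at *
              cases hq : (PySem.Dict.mk r).get? "duplicate_action" with
              | none => simp [hq] at h4
              | some sv =>
                simp [hq] at h4 ⊢; subst h4; decide
            simp [aStep, h1, h2, h3, h4, PySem.Dict.modify, PySem.Dict.insert, PySem.Dict.getD, PySem.Dict.get?, PySem.Dict.contains, ih, List.countP_cons, h1', h2', h3', h4', h4m, he]
            ring_nf <;> simp
          · have h4' : (bGet r "duplicate_action" == some "update") = false := by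
              simpa [bGet, aGet] using h4
            by_cases h5 : (aGet r "duplicate_action" == some "merge") = true
            · have h5' : (bGet r "duplicate_action" == some "merge") = true := by
                simpa [bGet, aGet] using h5
              simp [aStep, h1, h2, h3, h4, h5, PySem.Dict.modify, PySem.Dict.insert, PySem.Dict.getD, PySem.Dict.get?, PySem.Dict.contains, ih, List.countP_cons, h1', h2', h3', h4', h5', he]
              ring_nf <;> simp
            · have h5' : (bGet r "duplicate_action" == some "merge") = false := by
                simpa [bGet, aGet] using h5
              simp [aStep, h1, h2, h3, h4, h5, PySem.Dict.modify, PySem.Dict.insert, PySem.Dict.getD, PySem.Dict.get?, PySem.Dict.contains, ih, List.countP_cons, h1', h2', h3', h4', h5', he]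
              ring_nf <;> simp
        · have h3' : bTruthy r "existing_member" = false := by
            simp only [bTruthy, bGet, aGet] at *; simpa using h3
          simp [aStep, h1, h2, h3, PySem.Dict.modify, PySem.Dict.insert, PySem.Dict.getD, PySem.Dict.get?, PySem.Dict.contains, ih, List.countP_cons, h1', h2', h3', he]
          ring_nf <;> simp
      · have h2' : bTruthy r "will_import" = false := by
          simp only [bTruthy, bGet, aGet] at *; simpa using h2
        simp [aStep, h1, h2, PySem.Dict.modify, PySem.Dict.insert, PySem.Dict.getD, PySem.Dict.get?, PySem.Dict.contains, ih, List.countP_cons, h1', h2', he]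
        ring_nf <;> simp

-- the initial dict literal, built by ofList, is the literal Dict.mk
theorem ofList_summary_init (n : Int) :
    PySem.Dict.ofList
      [("total", n), ("will_import", 0), ("will_skip", 0),
       ("new_members", 0), ("updates", 0), ("merges", 0), ("errors", 0)]
    = PySem.Dict.mk
      [("total", n), ("will_import", 0), ("will_skip", 0),
       ("new_members", 0), ("updates", 0), ("merges", 0), ("errors", 0)] := by
  simp [PySem.Dict.ofList, PySem.Dict.update, PySem.Dict.insert, PySem.Dict.getD, PySem.Dict.get?, PySem.Dict.contains, PySem.Dict.empty]

-- ===== VERDICT (by name: the statement is the Claim_ definition above) =====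
theorem get_import_summary_spec : Claim_equal_get_import_summary := by
  intro rows _ _
  unfold Spec_get_import_summary get_import_summary get_import_summary_alt
  rw [ofList_summary_init, foldl_aStep_items]
  simp [List.countP_filter, ← List.countP_eq_length_filter, Bool.and_comm]
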